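-- pv_equiv track=rewrite | github.com/jramaswami/Binary_Search_Python | selling_products.py | solve
-- ===== SOURCE A (Python) =====
-- from collections import Counter
--
-- def solve(items, n):
--     items0 = sorted((freq, key) for key, freq in Counter(items).items())
--     soln = len(items0)
--     for freq, item in items0:
--         if freq > n:
--             break
--         soln -= 1
--         n -= freq
--     return soln
-- ===== SOURCE B (Python) =====
-- from collections import Counter
--
-- def solve(items, n):
--     # Bucket/counting approach: no comparison sort.  buckets[f] = number of item
--     # types occurring exactly f times; sweep f = 1..len(items) upward, dropping
--     # whole buckets with one division instead of one subtraction per type.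
--     buckets = Counter(Counter(items).values())
--     kept = sum(buckets.values())
--     budget = n
--     for f in range(1, len(items) + 1):
--         m = buckets.get(f, 0)
--         if m == 0:
--             continue
--         if budget < f:
--             break
--         take = min(m, budget // f)
--         kept -= take
--         budget -= take * f
--         if take < m:
--             break
--     return kept
-- ===== Notes on version B (the rewrite author's own statement) =====
-- stated objective: faster
-- what changed: Replaces A's lexicographic comparison sort of (freq,key) pairs plus per-type subtraction loop by a counting/bucket algorithm: a Counter of frequencies (freq -> number of types with that freq), then an upward integer sweep over f = 1..len(items) that drops each whole bucket at once with one floor division (take = min(m, budget//f)).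
import Mathlib
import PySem

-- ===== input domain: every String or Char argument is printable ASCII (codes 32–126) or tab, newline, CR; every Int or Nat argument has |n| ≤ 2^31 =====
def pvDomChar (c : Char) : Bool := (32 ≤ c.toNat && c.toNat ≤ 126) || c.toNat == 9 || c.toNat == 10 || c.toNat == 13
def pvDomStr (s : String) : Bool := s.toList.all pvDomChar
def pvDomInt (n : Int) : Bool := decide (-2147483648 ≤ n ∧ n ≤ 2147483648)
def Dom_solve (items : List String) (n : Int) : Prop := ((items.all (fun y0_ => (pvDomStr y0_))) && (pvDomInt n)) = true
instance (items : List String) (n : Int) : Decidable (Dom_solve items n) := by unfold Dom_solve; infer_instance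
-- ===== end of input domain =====

-- B replaces A's comparison sort of (freq, key) pairs plus per-type subtraction loop by a
-- counting/bucket sweep: a Counter of frequencies, then f = 1..len(items) upward, dropping
-- each whole bucket at once with one floor division (alternative decomposition, same results).

-- ===== PORT A =====
-- the 'for freq, item in items0: if freq > n: break; soln -= 1; n -= freq' loop
def solveLoop : List (Int × String) → Int → Int → Int
  | [], _, soln => soln
  | (freq, _) :: rest, n, soln =>
      if freq > n then soln else solveLoop rest (n - freq) (soln - 1)

def solve (items : List String) (n : Int) : Int :=
  let items0 := PySem.List.sorted2
      (((PySem.Dict.counter items).items).map (fun kv => (kv.2, kv.1)))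
      (fun p => p.1) (fun p => p.2) false
  solveLoop items0 n (items0.length : Int)

-- ===== PORT B =====
-- the 'for f in range(1, len(items)+1): …' bucket sweep, state = (budget, kept)
def bLoop (buckets : PySem.Dict Int Int) : List Int → Int → Int → Int
  | [], _, kept => kept
  | f :: rest, budget, kept =>
      let m := buckets.getD f 0
      if m = 0 then bLoop buckets rest budget kept
      else if budget < f then kept
      else
        let take := min m (PySem.Int.floordiv budget f)
        if take < m then kept - take
        else bLoop buckets rest (budget - take * f) (kept - take)

def solve_alt (items : List String) (n : Int) : Int :=
  let buckets := PySem.Dict.counter ((PySem.Dict.counter items).values)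
  let kept := (buckets.values).sum
  bLoop buckets (PySem.List.pyRange 1 ((items.length : Int) + 1) 1) n kept

-- ===== PRECONDITION & SPEC =====
def Spec_solve (items : List String) (n : Int) (out : Int) : Prop := out = solve_alt items n
instance (items : List String) (n : Int) (out : Int) : Decidable (Spec_solve items n out) := by unfold Spec_solve; infer_instance

-- ===== CLAIM (what is proved, stated in full; the proofs are below) =====
def Claim_equal_solve : Prop := ∀ (items : List String) (n : Int), Dom_solve items n → Spec_solve items n (solve items n)

-- ===== LEMMAS AND PROOFS =====

-- the abstract one-by-one greedy over the sorted frequency list: number of types kept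
def gKeep : List Int → Int → Int
  | [], _ => 0
  | f :: t, b => if f > b then 1 + (t.length : Int) else gKeep t (b - f)

-- A's loop in terms of gKeep
theorem solveLoop_eq_g : ∀ (ps : List (Int × String)) (n s : Int),
    solveLoop ps n s = s - (ps.length : Int) + gKeep (ps.map Prod.fst) n := by
  intro ps
  induction ps with
  | nil => intro n s; simp [solveLoop, gKeep]
  | cons p t ih =>
    intro n s
    obtain ⟨f, k⟩ := p
    by_cases h : f > n
    · simp only [solveLoop, List.map_cons, gKeep, if_pos h, List.length_cons,
        List.length_map]
      push_cast; ring
    · simp only [solveLoop, List.map_cons, gKeep, if_neg h, List.length_cons, ih]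
      push_cast; ring

-- if every element exceeds the budget, everything is kept
theorem gKeep_all : ∀ (s : List Int) (b : Int), (∀ x ∈ s, b < x) → gKeep s b = (s.length : Int) := by
  intro s
  induction s with
  | nil => intro b _; simp [gKeep]
  | cons f t ih =>
    intro b h
    have hf : b < f := h f (by simp)
    simp only [gKeep, if_pos hf, List.length_cons]
    push_cast; ring

-- a fully affordable block of m copies of f is entirely dropped
theorem gKeep_replicate_all (f : Int) (hf : 1 ≤ f) : ∀ (m : Nat) (b : Int) (rest : List Int),
    (m : Int) * f ≤ b → gKeep (List.replicate m f ++ rest) b = gKeep rest (b - (m : Int) * f) := by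
  intro m
  induction m with
  | zero => intro b rest _; simp
  | succ m ih =>
    intro b rest h
    have hm : (0 : Int) ≤ (m : Int) * f := by positivity
    have hfb : ¬ f > b := by push_cast at h; nlinarith
    have h' : (m : Int) * f ≤ b - f := by push_cast at h ⊢; nlinarith
    simp only [List.replicate_succ, List.cons_append, gKeep, if_neg hfb, ih (b - f) rest h']
    congr 1
    push_cast; ring

-- the ascending concatenation of frequency buckets lo, lo+1, …, hi-1
def bucketFlat (v : List Int) (lo hi : Int) : List Int :=
  (PySem.List.pyRange lo hi 1).flatMap (fun f => List.replicate (v.count f) f)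

theorem mem_bucketFlat_ge (v : List Int) (lo hi x : Int) (hx : x ∈ bucketFlat v lo hi) : lo ≤ x := by
  simp only [bucketFlat, List.mem_flatMap, PySem.List.mem_pyRange_one] at hx
  obtain ⟨f, ⟨hlo, _⟩, hrep⟩ := hx
  have := List.eq_of_mem_replicate hrep
  omega

theorem bucketFlat_cons (v : List Int) (lo hi : Int) (h : lo < hi) :
    bucketFlat v lo hi = List.replicate (v.count lo) lo ++ bucketFlat v (lo + 1) hi := by
  simp [bucketFlat, PySem.List.pyRange_one_cons h]

-- B's bucket sweep in terms of gKeep over the flattened buckets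
theorem bLoop_eq (v : List Int) : ∀ (k : Nat) (lo b kept : Int), 1 ≤ lo →
    bLoop (PySem.Dict.counter v) (PySem.List.pyRange lo (lo + (k : Int)) 1) b kept
      = kept - ((bucketFlat v lo (lo + (k : Int))).length : Int)
          + gKeep (bucketFlat v lo (lo + (k : Int))) b := by
  intro k
  induction k with
  | zero =>
    intro lo b kept _
    simp [PySem.List.pyRange_one_eq_nil (le_refl lo), bLoop, bucketFlat, gKeep]
  | succ k ih =>
    intro lo b kept hlo
    have hlt : lo < lo + ((k : Int) + 1) := by omega
    rw [show ((k + 1 : Nat) : Int) = (k : Int) + 1 by push_cast; ring]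
    rw [PySem.List.pyRange_one_cons hlt, bucketFlat_cons v lo _ hlt]
    have hsh : lo + ((k : Int) + 1) = (lo + 1) + (k : Int) := by ring
    simp only [bLoop, PySem.Dict.getD_counter]
    by_cases hc : (v.count lo : Int) = 0
    · have hc0 : v.count lo = 0 := by exact_mod_cast hc
      rw [if_pos hc, hc0]
      simp only [List.replicate_zero, List.nil_append, hsh]
      exact ih (lo + 1) b kept (by omega)
    · rw [if_neg hc]
      have hcpos : 0 < v.count lo := Nat.pos_of_ne_zero (by exact_mod_cast hc)
      by_cases hb : b < lo
      · rw [if_pos hb]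
        have hall : ∀ x ∈ List.replicate (v.count lo) lo ++ bucketFlat v (lo + 1) (lo + ((k:Int)+1)), b < x := by
          intro x hx
          rcases List.mem_append.1 hx with hx | hx
          · have := List.eq_of_mem_replicate hx; omega
          · have := mem_bucketFlat_ge v (lo+1) _ x hx; omega
        rw [gKeep_all _ b hall]
        ring
      · rw [if_neg hb]
        have hlopos : (0:Int) < lo := by omega
        have hq : PySem.Int.floordiv b lo = b / lo :=
          PySem.Int.floordiv_eq_ediv_of_pos hlopos
        set q := b / lo with hqdef
        have hmod := Int.mul_ediv_add_emod b lo
        have hr0 : 0 ≤ b % lo := Int.emod_nonneg b (by omega)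
        have hrlt : b % lo < lo := Int.emod_lt_of_pos b hlopos
        have hq1 : 1 ≤ q := by
          rw [hqdef, Int.le_ediv_iff_mul_le hlopos]; omega
        have hql : q * lo = lo * (b / lo) := by rw [hqdef]; ring
        rw [hq]
        by_cases htk : min ((v.count lo : Int)) q < (v.count lo : Int)
        · -- partial bucket: drop q = b // lo types, budget exhausted, break
          have hqlt : q < (v.count lo : Int) := by
            rcases le_or_gt (v.count lo : Int) q with h | h
            · simp [min_eq_left h] at htk
            · exact h
          have hmin : min ((v.count lo : Int)) q = q := min_eq_right (by omega)
          rw [if_pos htk, hmin]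
          -- RHS: split the front bucket into q dropped copies and the rest
          have hqn : q.toNat ≤ v.count lo := by omega
          have hsplit : List.replicate (v.count lo) lo
              = List.replicate q.toNat lo ++ List.replicate (v.count lo - q.toNat) lo := by
            rw [← List.replicate_add]
            congr 1
            omega
          rw [hsplit, List.append_assoc]
          rw [gKeep_replicate_all lo (by omega) q.toNat b _
            (by rw [Int.toNat_of_nonneg (by omega)]; omega)]
          have hq' : (q.toNat : Int) = q := Int.toNat_of_nonneg (by omega)
          have hall : ∀ x ∈ List.replicate (v.count lo - q.toNat) lo ++ bucketFlat v (lo + 1) (lo + ((k:Int)+1)),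
              b - (q.toNat : Int) * lo < x := by
            intro x hx
            have hbr : b - (q.toNat : Int) * lo < lo := by rw [hq']; omega
            rcases List.mem_append.1 hx with hx | hx
            · have := List.eq_of_mem_replicate hx; omega
            · have := mem_bucketFlat_ge v (lo+1) _ x hx; omega
          rw [gKeep_all _ _ hall]
          simp only [List.length_append, List.length_replicate]
          have hqc : q.toNat ≤ v.count lo := hqn
          omega
        · -- whole bucket dropped, sweep continues
          have hle : (v.count lo : Int) ≤ q := by omega
          have hmin : min ((v.count lo : Int)) q = (v.count lo : Int) := min_eq_left hle
          rw [if_neg htk, hmin]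
          rw [gKeep_replicate_all lo (by omega) (v.count lo) b _
            (by have h1 : (v.count lo : Int) * lo ≤ q * lo :=
                  mul_le_mul_of_nonneg_right hle (by omega)
                omega)]
          rw [hsh]
          rw [ih (lo + 1) (b - (v.count lo : Int) * lo) (kept - (v.count lo : Int)) (by omega)]
          simp only [List.length_append, List.length_replicate]
          push_cast
          ring

-- the flattened buckets are nondecreasing
theorem bucketFlat_pairwise (v : List Int) : ∀ (k : Nat) (lo : Int),
    (bucketFlat v lo (lo + (k : Int))).Pairwise (· ≤ ·) := by
  intro k
  induction k with
  | zero =>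
    intro lo
    rw [show lo + ((0 : Nat) : Int) = lo by push_cast; ring]
    simp [bucketFlat, PySem.List.pyRange_one_eq_nil (le_refl lo)]
  | succ k ih =>
    intro lo
    have hlt : lo < lo + ((k : Int) + 1) := by omega
    rw [show ((k + 1 : Nat) : Int) = (k : Int) + 1 by push_cast; ring]
    rw [bucketFlat_cons v lo _ hlt]
    rw [List.pairwise_append]
    refine ⟨List.pairwise_replicate.2 (Or.inr le_rfl), ?_, ?_⟩
    · have := ih (lo + 1)
      rwa [show (lo + 1) + (k : Int) = lo + ((k : Int) + 1) by ring] at this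
    · intro x hx y hy
      have hx' := List.eq_of_mem_replicate hx
      have hy' := mem_bucketFlat_ge v (lo + 1) _ y hy
      omega

-- element counts of the flattened buckets
theorem count_bucketFlat (v : List Int) : ∀ (k : Nat) (lo x : Int),
    List.count x (bucketFlat v lo (lo + (k : Int)))
      = if lo ≤ x ∧ x < lo + (k : Int) then v.count x else 0 := by
  intro k
  induction k with
  | zero =>
    intro lo x
    rw [show lo + ((0 : Nat) : Int) = lo by push_cast; ring]
    simp only [bucketFlat, PySem.List.pyRange_one_eq_nil (le_refl lo), List.flatMap_nil,
      List.count_nil]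
    rw [if_neg (by omega)]
  | succ k ih =>
    intro lo x
    have hlt : lo < lo + ((k : Int) + 1) := by omega
    rw [show ((k + 1 : Nat) : Int) = (k : Int) + 1 by push_cast; ring]
    rw [bucketFlat_cons v lo _ hlt, List.count_append, List.count_replicate]
    have := ih (lo + 1) x
    rw [show (lo + 1) + (k : Int) = lo + ((k : Int) + 1) by ring] at this
    rw [this]
    by_cases hx : x = lo
    · subst hx
      simp only [beq_self_eq_true, if_true]
      rw [if_neg (by omega), if_pos (by omega)]
      omega
    · rw [if_neg (by simpa using Ne.symm hx)]
      by_cases h1 : lo + 1 ≤ x ∧ x < lo + ((k : Int) + 1)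
      · rw [if_pos h1, if_pos (by omega)]; omega
      · rw [if_neg h1, if_neg (by omega)]

-- the flattened buckets are a permutation of the value list (values all in [1, L])
theorem bucketFlat_perm (v : List Int) (L : Nat)
    (hmem : ∀ x ∈ v, 1 ≤ x ∧ x ≤ (L : Int)) :
    (bucketFlat v 1 (1 + (L : Int))).Perm v := by
  rw [List.perm_iff_count]
  intro x
  rw [count_bucketFlat v L 1 x]
  by_cases h : 1 ≤ x ∧ x < 1 + (L : Int)
  · rw [if_pos h]
  · rw [if_neg h]
    by_cases hx : x ∈ v
    · have := hmem x hx; omega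
    · simp [List.count_eq_zero_of_not_mem hx]

-- sorted2 machinery for A's side: insertBy preserves Pairwise r for a transitive r
theorem insertBy_pairwise {α : Type} (r : α → α → Prop) (before : α → α → Bool)
    (htr : ∀ a b c, r a b → r b c → r a c)
    (hbt : ∀ a b, before a b = true → r a b)
    (hbf : ∀ a b, before a b = false → r b a)
    (x : α) : ∀ ys : List α, ys.Pairwise r → (PySem.List.insertBy before x ys).Pairwise r := by
  intro ys
  induction ys with
  | nil => intro _; simp [PySem.List.insertBy]
  | cons y t ih =>
    intro hp
    rw [List.pairwise_cons] at hp
    by_cases hb : before x y = true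
    · simp only [PySem.List.insertBy, hb, if_true]
      refine List.Pairwise.cons ?_ (List.Pairwise.cons hp.1 hp.2)
      intro z hz
      rcases List.mem_cons.1 hz with rfl | hz
      · exact hbt _ _ hb
      · exact htr _ _ _ (hbt _ _ hb) (hp.1 z hz)
    · simp only [PySem.List.insertBy, hb]
      refine List.Pairwise.cons ?_ (ih hp.2)
      intro z hz
      rw [PySem.List.mem_insertBy] at hz
      rcases hz with rfl | hz
      · exact hbf _ _ (by simpa using hb)
      · exact hp.1 z hz

theorem foldl_insertBy_pairwise {α : Type} (r : α → α → Prop) (before : α → α → Bool)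
    (htr : ∀ a b c, r a b → r b c → r a c)
    (hbt : ∀ a b, before a b = true → r a b)
    (hbf : ∀ a b, before a b = false → r b a) :
    ∀ (xs acc : List α), acc.Pairwise r →
      (xs.foldl (fun acc x => PySem.List.insertBy before x acc) acc).Pairwise r := by
  intro xs
  induction xs with
  | nil => intro acc h; simpa using h
  | cons x t ih =>
    intro acc h
    exact ih _ (insertBy_pairwise r before htr hbt hbf x acc h)

-- sorted2 output is nondecreasing on the first key
theorem sorted2_pairwise_fst {α : Type} (xs : List α) (k1 : α → Int) (k2 : α → String) :
    (PySem.List.sorted2 xs k1 k2 false).Pairwise (fun a b => k1 a ≤ k1 b) := by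
  show (xs.foldl (fun acc x => PySem.List.insertBy
      (fun a b => decide (k1 a < k1 b) || (!decide (k1 b < k1 a) && decide (k2 a < k2 b))) x acc) []).Pairwise _
  apply foldl_insertBy_pairwise
  · intro a b c h1 h2; omega
  · intro a b h
    simp only [Bool.or_eq_true, Bool.and_eq_true, decide_eq_true_eq, Bool.not_eq_true',
      decide_eq_false_iff_not] at h
    rcases h with h | ⟨h, _⟩ <;> omega
  · intro a b h
    simp only [Bool.or_eq_false_iff, decide_eq_false_iff_not] at h
    omega
  · exact List.Pairwise.nil

-- the sum of a counter's values is the length of the counted list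
theorem sum_values_counter (v : List Int) :
    ((PySem.Dict.counter v).values).sum = (v.length : Int) := by
  have hv : (PySem.Dict.counter v).values
      = (PySem.Set.ofList v).map (fun k => (v.count k : Int)) := by
    simp only [PySem.Dict.values, PySem.Dict.items_counter, List.map_map]
    rfl
  have hperm : (PySem.Set.ofList v).Perm v.dedup := by
    rw [List.perm_ext_iff_of_nodup (PySem.Set.nodup_ofList v) v.nodup_dedup]
    intro a
    rw [PySem.Set.mem_ofList, List.mem_dedup]
  rw [hv]
  have := (hperm.map (fun k => (v.count k : Int))).sum_eq
  rw [this]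
  have hmm : v.dedup.map (fun k => (v.count k : Int))
      = (v.dedup.map (fun k => v.count k)).map (fun m : Nat => (m : Int)) := by
    simp [List.map_map, Function.comp]
  rw [hmm, ← Nat.cast_list_sum, List.sum_map_count_dedup_eq_length]

-- ===== VERDICT (by name: the statement is the Claim_ definition above) =====
theorem solve_spec : Claim_equal_solve := by
  intro items n _
  unfold Spec_solve solve solve_alt
  set v := (PySem.Dict.counter items).values with hv
  -- every frequency is in [1, items.length]
  have hvmem : ∀ x ∈ v, 1 ≤ x ∧ x ≤ (items.length : Int) := by
    intro x hx
    rw [hv] at hx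
    simp only [PySem.Dict.values, PySem.Dict.items_counter, List.map_map] at hx
    obtain ⟨key, hkey, rfl⟩ := List.mem_map.1 hx
    have hk : key ∈ items := (PySem.Set.mem_ofList _ _).1 hkey
    have h1 : 0 < items.count key := List.count_pos_iff.2 hk
    have h2 : items.count key ≤ items.length := List.count_le_length
    simp only [Function.comp_apply]
    constructor <;> [exact_mod_cast h1; exact_mod_cast h2]
  -- A's side: lex-sorted pairs projected to frequencies = sorted v
  set pairs := ((PySem.Dict.counter items).items).map (fun kv => (kv.2, kv.1)) with hpairs
  set items0 := PySem.List.sorted2 pairs (fun p => p.1) (fun p => p.2) false with hitems0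
  have hfst : items0.map Prod.fst = PySem.List.sorted v (fun x => x) false := by
    symm
    apply PySem.List.sorted_id_eq_of_perm_of_pairwise
    · have hperm : items0.Perm pairs := PySem.List.sorted2_perm ..
      have h1 : (items0.map Prod.fst).Perm (pairs.map Prod.fst) := hperm.map _
      refine h1.trans (List.Perm.of_eq ?_)
      rw [hpairs, hv]
      simp [PySem.Dict.values, List.map_map, Function.comp]
    · have h := sorted2_pairwise_fst pairs (fun p => p.1) (fun p => p.2)
      rw [← hitems0] at h
      exact (List.pairwise_map).2 h
  -- B's side: the bucket sweep equals gKeep over the flattened buckets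
  have hrange : (items.length : Int) + 1 = 1 + ((items.length : Nat) : Int) := by ring
  rw [solveLoop_eq_g, hrange, bLoop_eq v items.length 1 n _ (le_refl 1),
    sum_values_counter v]
  -- the flattened buckets ARE sorted v
  have hflat : bucketFlat v 1 (1 + ((items.length : Nat) : Int))
      = PySem.List.sorted v (fun x => x) false := by
    symm
    apply PySem.List.sorted_id_eq_of_perm_of_pairwise
    · exact bucketFlat_perm v items.length hvmem
    · have := bucketFlat_pairwise v items.length 1
      exact this
  rw [hflat, hfst]
  have hlen : (PySem.List.sorted v (fun x => x) false).length = v.length :=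
    (PySem.List.sorted_perm ..).length_eq
  rw [hlen]
  ring
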